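-- pv_equiv track=rewrite | github.com/martinjedwabny/pddl-ethical | generator.py | format_conjunction
-- ===== SOURCE A (Python) =====
-- def format_conjunction(pos_elems, neg_elems):
--     text = ""
--     if not (pos_elems or neg_elems):
--         text = "()"
--     elif len(pos_elems) + len(neg_elems) > 1:
--         text = "(and"
--         for pos in pos_elems:
--             #TODO : awful there
--             # text += " ("+pos[0]+")"
--             text += " ("
--             for p in pos:
--                 text += " " + p
--             text += ")"
--         for neg in neg_elems:
--             # text += " (not("+neg[0]+"))"
--             text += " ("
--             for n in neg:
--                 text += " not(" + n + ")"
--             text += ")"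
--         text += ")"
--     else:
--         if not pos_elems:
--             #TODO : awful there again
--             # text += "(not("+neg_elems[0][0]+"))"
--             text += " ("
--             for n in neg_elems[0]:
--                 text += " not(" + n + ")"
--             text += ")"
--         else:
--             # text += "("+pos_elems[0][0]+")"
--             text += " ("
--             for p in pos_elems[0]:
--                 text += " " + p
--             text += ")"
--
--     return text
-- ===== SOURCE B (Python) =====
-- def format_conjunction(pos_elems, neg_elems):
--     # Build the result BACK-TO-FRONT: walk the tagged clauses and their atoms in
--     # reversed order, pushing fragments onto `rev`, then reverse-and-join once.
--     clauses = [(p, False) for p in pos_elems] + [(n, True) for n in neg_elems]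
--     if not clauses:
--         return '()'
--     rev = [')'] if len(clauses) > 1 else []
--     for atoms, negated in reversed(clauses):
--         rev.append(')')
--         for a in reversed(atoms):
--             rev.append(' not(' + a + ')' if negated else ' ' + a)
--         rev.append(' (')
--     if len(clauses) > 1:
--         rev.append('(and')
--     return ''.join(reversed(rev))
-- ===== Notes on version B (the rewrite author's own statement) =====
-- stated objective: alternative
-- what changed: B unifies the inputs into one sign-tagged clause list and assembles the output back-to-front: it walks clauses and atoms in reversed order pushing fragments onto a reversed fragment list and does a single reverse-and-join, replacing A's three duplicated branches of forward string accumulation.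
import Mathlib
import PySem

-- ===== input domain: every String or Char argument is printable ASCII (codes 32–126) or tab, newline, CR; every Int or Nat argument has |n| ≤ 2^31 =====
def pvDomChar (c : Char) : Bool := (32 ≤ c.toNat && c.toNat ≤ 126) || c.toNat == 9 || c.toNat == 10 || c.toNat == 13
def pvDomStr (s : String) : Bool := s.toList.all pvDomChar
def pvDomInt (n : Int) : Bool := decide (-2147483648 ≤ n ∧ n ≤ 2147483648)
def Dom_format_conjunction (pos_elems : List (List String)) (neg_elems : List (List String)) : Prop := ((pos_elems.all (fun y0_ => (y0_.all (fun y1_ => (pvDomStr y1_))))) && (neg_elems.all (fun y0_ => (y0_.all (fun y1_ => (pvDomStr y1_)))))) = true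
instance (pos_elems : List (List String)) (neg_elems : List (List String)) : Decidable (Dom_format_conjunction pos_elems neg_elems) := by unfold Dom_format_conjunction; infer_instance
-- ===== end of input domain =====

-- B builds the output back-to-front: one reversed pass over a tagged clause list pushing fragments, then a single reverse-and-join; replaces A's three forward accumulation branches (objective: alternative).


-- ===== PORT A =====
-- Literal transliteration of A: same branch order, each Python for-loop a foldl
-- over the accumulated text string.
def format_conjunction (pos_elems : List (List String)) (neg_elems : List (List String)) : String :=
  if pos_elems = [] ∧ neg_elems = [] then
    "()"
  else if pos_elems.length + neg_elems.length > 1 then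
    let text := "(and"
    let text := pos_elems.foldl (fun t pos =>
      (pos.foldl (fun t p => t ++ " " ++ p) (t ++ " (")) ++ ")") text
    let text := neg_elems.foldl (fun t neg =>
      (neg.foldl (fun t n => t ++ " not(" ++ n ++ ")") (t ++ " (")) ++ ")") text
    text ++ ")"
  else if pos_elems = [] then
    -- neg_elems[0]: in this branch neg_elems is nonempty, so the Python index never raises
    ((neg_elems.headD []).foldl (fun t n => t ++ " not(" ++ n ++ ")") (" (")) ++ ")"
  else
    ((pos_elems.headD []).foldl (fun t p => t ++ " " ++ p) (" (")) ++ ")"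

-- ===== PORT B =====
-- Literal transliteration of Source B: the Python fragment list `rev` is a List String
-- (list.append = ++ [x]); reversed(...) = .reverse, ''.join(reversed(rev)) = join rev.reverse.
def format_conjunction_alt (pos_elems : List (List String)) (neg_elems : List (List String)) : String :=
  let clauses := pos_elems.map (fun p => (p, false)) ++ neg_elems.map (fun n => (n, true))
  if clauses = [] then "()"
  else
    let rev : List String := if clauses.length > 1 then [")"] else []
    let rev := clauses.reverse.foldl (fun r c =>
      let r := r ++ [")"]
      let r := c.1.reverse.foldl (fun r a =>
        r ++ [if c.2 then " not(" ++ a ++ ")" else " " ++ a]) r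
      r ++ [" ("]) rev
    let rev := if clauses.length > 1 then rev ++ ["(and"] else rev
    String.join rev.reverse

-- ===== PRECONDITION & SPEC =====
def Spec_format_conjunction (pos_elems : List (List String)) (neg_elems : List (List String)) (out : String) : Prop := out = format_conjunction_alt pos_elems neg_elems
instance (pos_elems : List (List String)) (neg_elems : List (List String)) (out : String) : Decidable (Spec_format_conjunction pos_elems neg_elems out) := by unfold Spec_format_conjunction; infer_instance

-- ===== CLAIM (what is proved, stated in full; the proofs are below) =====
def Claim_equal_format_conjunction : Prop := ∀ (pos_elems : List (List String)) (neg_elems : List (List String)), Dom_format_conjunction pos_elems neg_elems → Spec_format_conjunction pos_elems neg_elems (format_conjunction pos_elems neg_elems)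

-- ===== LEMMAS AND PROOFS =====

-- shared normal form: one formatted piece per clause
def pvWrap (neg : Bool) (a : String) : String :=
  if neg then " not(" ++ a ++ ")" else " " ++ a

def pvPiece (c : List String × Bool) : String :=
  " (" ++ String.join (c.1.map (pvWrap c.2)) ++ ")"

theorem join_nil : String.join [] = "" := rfl

theorem foldl_append_shift (xs : List String) (t : String) :
    xs.foldl (fun r s => r ++ s) t = t ++ String.join xs := by
  induction xs generalizing t with
  | nil => simp [join_nil]
  | cons x xs ih =>
      have h1 : String.join (x :: xs) = List.foldl (fun r s => r ++ s) ("" ++ x) xs := rfl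
      rw [List.foldl_cons, ih, h1, ih]
      simp [String.append_assoc]

theorem join_cons (x : String) (xs : List String) :
    String.join (x :: xs) = x ++ String.join xs := by
  have h1 : String.join (x :: xs) = List.foldl (fun r s => r ++ s) ("" ++ x) xs := rfl
  rw [h1, foldl_append_shift]
  simp

theorem join_append (xs ys : List String) :
    String.join (xs ++ ys) = String.join xs ++ String.join ys := by
  induction xs with
  | nil => simp [join_nil]
  | cons x xs ih => simp [join_cons, ih, String.append_assoc]

-- ===== A-side: each accumulation loop equals appending the joined pieces =====

theorem pvWrap_false : pvWrap false = fun a => " " ++ a := rfl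

theorem pvWrap_true : pvWrap true = fun a => " not(" ++ a ++ ")" := rfl

theorem inner_foldl_eq_join (f : String → String) (xs : List String) (t : String) :
    xs.foldl (fun t x => t ++ f x) t = t ++ String.join (xs.map f) := by
  induction xs generalizing t with
  | nil => simp [join_nil]
  | cons x xs ih => rw [List.foldl_cons, ih, List.map_cons, join_cons, String.append_assoc]

theorem outer_foldl_eq_join (f : String → String) (xss : List (List String)) (t : String) :
    xss.foldl (fun t xs => (xs.foldl (fun t x => t ++ f x) (t ++ " (")) ++ ")") t
      = t ++ String.join (xss.map (fun xs => " (" ++ String.join (xs.map f) ++ ")")) := by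
  induction xss generalizing t with
  | nil => simp [join_nil]
  | cons xs xss ih =>
      rw [List.foldl_cons, inner_foldl_eq_join, ih, List.map_cons, join_cons]
      simp [String.append_assoc]

theorem inner_pos (xs : List String) (t : String) :
    xs.foldl (fun t p => t ++ " " ++ p) t = t ++ String.join (xs.map (fun p => " " ++ p)) := by
  have h := inner_foldl_eq_join (fun p => " " ++ p) xs t
  simpa [String.append_assoc] using h

theorem inner_neg (xs : List String) (t : String) :
    xs.foldl (fun t n => t ++ " not(" ++ n ++ ")") t
      = t ++ String.join (xs.map (fun n => " not(" ++ n ++ ")")) := by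
  have h := inner_foldl_eq_join (fun n => " not(" ++ n ++ ")") xs t
  simpa [String.append_assoc] using h

theorem outer_pos (xss : List (List String)) (t : String) :
    xss.foldl (fun t pos => (pos.foldl (fun t p => t ++ " " ++ p) (t ++ " (")) ++ ")") t
      = t ++ String.join (xss.map (fun xs => pvPiece (xs, false))) := by
  simp only [pvPiece, pvWrap_false]
  have h := outer_foldl_eq_join (fun p => " " ++ p) xss t
  rw [← h]
  congr 1
  funext a b
  rw [inner_pos, inner_foldl_eq_join (fun p => " " ++ p) b (a ++ " (")]

theorem outer_neg (xss : List (List String)) (t : String) :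
    xss.foldl (fun t neg => (neg.foldl (fun t n => t ++ " not(" ++ n ++ ")") (t ++ " (")) ++ ")") t
      = t ++ String.join (xss.map (fun xs => pvPiece (xs, true))) := by
  simp only [pvPiece, pvWrap_true]
  have h := outer_foldl_eq_join (fun n => " not(" ++ n ++ ")") xss t
  rw [← h]
  congr 1
  funext a b
  rw [inner_neg, inner_foldl_eq_join (fun n => " not(" ++ n ++ ")") b (a ++ " (")]

-- ===== B-side: the back-to-front fragment build joins to the pieces =====

theorem foldl_push {α : Type} (f : α → String) (xs : List α) (r : List String) :
    xs.foldl (fun r a => r ++ [f a]) r = r ++ xs.map f := by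
  induction xs generalizing r with
  | nil => simp
  | cons x xs ih => simp [ih]

-- one clause step pushes exactly its reversed fragments
theorem step_eq (c : List String × Bool) (r : List String) :
    (let r := r ++ [")"]
     let r := c.1.reverse.foldl (fun r a =>
       r ++ [if c.2 then " not(" ++ a ++ ")" else " " ++ a]) r
     r ++ [" ("])
      = r ++ ([")"] ++ c.1.reverse.map (pvWrap c.2) ++ [" ("]) := by
  simp only [foldl_push]
  simp [pvWrap, List.append_assoc]

theorem join_revfrags (c : List String × Bool) :
    String.join ([")"] ++ c.1.reverse.map (pvWrap c.2) ++ [" ("]).reverse = pvPiece c := by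
  simp only [List.reverse_append, List.reverse_cons, List.reverse_nil, List.map_reverse,
    List.reverse_reverse, List.nil_append, List.singleton_append]
  rw [join_cons, join_append]
  simp [pvPiece, join_cons, join_nil, String.append_assoc]

theorem build_eq (cs : List (List String × Bool)) (r : List String) :
    String.join ((cs.foldl (fun r c =>
      let r := r ++ [")"]
      let r := c.1.reverse.foldl (fun r a =>
        r ++ [if c.2 then " not(" ++ a ++ ")" else " " ++ a]) r
      r ++ [" ("]) r).reverse)
      = String.join (cs.reverse.map pvPiece) ++ String.join r.reverse := by
  induction cs generalizing r with
  | nil => simp [join_nil]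
  | cons c cs ih =>
      rw [List.foldl_cons]
      rw [show (let r' := r ++ [")"]
            let r' := c.1.reverse.foldl (fun r a =>
              r ++ [if c.2 then " not(" ++ a ++ ")" else " " ++ a]) r'
            r' ++ [" ("]) = r ++ ([")"] ++ c.1.reverse.map (pvWrap c.2) ++ [" ("]) from step_eq c r]
      rw [ih]
      rw [List.reverse_append, join_append, join_revfrags]
      simp [List.reverse_cons, join_append, join_cons, join_nil, String.append_assoc]

-- B in normal form
theorem alt_eq (pos_elems neg_elems : List (List String)) :
    format_conjunction_alt pos_elems neg_elems =
      (let clauses := pos_elems.map (fun p => (p, false)) ++ neg_elems.map (fun n => (n, true))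
       if clauses = [] then "()"
       else if clauses.length > 1 then "(and" ++ String.join (clauses.map pvPiece) ++ ")"
       else String.join (clauses.map pvPiece)) := by
  unfold format_conjunction_alt
  set clauses := pos_elems.map (fun p => (p, false)) ++ neg_elems.map (fun n => (n, true)) with hc
  by_cases h0 : clauses = []
  · simp [h0]
  · simp only [h0, if_false]
    by_cases h1 : clauses.length > 1
    · simp only [h1, if_true]
      rw [List.reverse_append, join_append, build_eq]
      simp [List.reverse_reverse, join_cons, join_nil, String.append_assoc]
    · simp only [h1, if_false]
      rw [build_eq]
      simp [List.reverse_reverse, join_nil]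

-- ===== VERDICT (by name: the statement is the Claim_ definition above) =====
theorem format_conjunction_spec : Claim_equal_format_conjunction := by
  intro pos neg _
  unfold Spec_format_conjunction
  rw [alt_eq]
  simp only [List.map_append, List.map_map, Function.comp_def]
  unfold format_conjunction
  rcases pos with _ | ⟨p, ps⟩
  · rcases neg with _ | ⟨n, ns⟩
    · simp
    · rcases ns with _ | ⟨n', ns'⟩
      · rw [inner_neg]
        simp [pvPiece, pvWrap_true, join_cons, join_nil, String.append_assoc]

      · simp only [List.length, List.nil_append, List.map]
        rw [outer_neg]
        simp [join_cons, pvPiece, pvWrap_true, String.append_assoc]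
  · rcases ps with _ | ⟨p', ps'⟩
    · rcases neg with _ | ⟨n, ns⟩
      · rw [inner_pos]
        simp [pvPiece, pvWrap_false, join_cons, join_nil, String.append_assoc]
      · simp only [List.length, List.map, List.cons_append]
        rw [outer_pos, outer_neg]
        simp [join_cons, join_nil, String.append_assoc]
    · simp only [List.length, List.map, List.cons_append]
      rw [outer_pos, outer_neg]
      rw [if_neg (by simp), if_pos (by omega)]
      simp [join_cons, join_append, String.append_assoc]
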